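-- pv_equiv track=rewrite | github.com/mahnoorfatima997/macad-thesis-25 | thesis-agents/archive/2107/2107_socratic_tutor.py | identify_primary_gap
-- ===== SOURCE A (Python) =====
-- from typing import Dict, Any, List
--
-- def identify_primary_gap(cognitive_flags: List[str], synthesis: Dict) -> str:
--     """Identify the most important cognitive gap to address first"""
--
--     # Priority order for addressing cognitive gaps
--     gap_priority = {
--         "needs_brief_clarification": 1,  # Foundation first
--         "needs_accessibility_guidance": 2,  # Safety/legal requirements
--         "needs_spatial_thinking_support": 3,  # Core design skill
--         "low_confidence_analysis": 4,  # Build confidence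
--         "complexity_mismatch_high": 5,  # Adjust difficulty
--         "complexity_mismatch_low": 6   # Challenge appropriately
--     }
--
--     # Find highest priority gap
--     relevant_gaps = []
--     for flag in cognitive_flags:
--         if flag in gap_priority:
--             relevant_gaps.append((flag, gap_priority[flag]))
--
--     if relevant_gaps:
--         # Sort by priority and return highest priority gap
--         relevant_gaps.sort(key=lambda x: x[1])
--         primary_gap = relevant_gaps[0][0]
--     else:
--         # Default to spatial thinking if no specific flags
--         primary_gap = "spatial_relationships"
--
--     # Map flags to question categories
--     gap_mapping = {
--         "needs_accessibility_guidance": "accessibility_awareness",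
--         "needs_spatial_thinking_support": "spatial_relationships",
--         "needs_brief_clarification": "brief_development",
--         "low_confidence_analysis": "brief_development",
--         "complexity_mismatch_high": "brief_development",
--         "complexity_mismatch_low": "systems_thinking"
--     }
--
--     return gap_mapping.get(primary_gap, "spatial_relationships")
-- ===== SOURCE B (Python) =====
-- # Single ordered scan of the priority table (already in priority order 1..6)
-- # against a set of the flags, instead of collect -> sort -> map.
-- _GAP_TABLE = [
--     ("needs_brief_clarification", "brief_development"),
--     ("needs_accessibility_guidance", "accessibility_awareness"),
--     ("needs_spatial_thinking_support", "spatial_relationships"),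
--     ("low_confidence_analysis", "brief_development"),
--     ("complexity_mismatch_high", "brief_development"),
--     ("complexity_mismatch_low", "systems_thinking"),
-- ]
--
-- def identify_primary_gap(cognitive_flags, synthesis):
--     """Identify the most important cognitive gap to address first"""
--     flags = set(cognitive_flags)
--     for key, category in _GAP_TABLE:
--         if key in flags:
--             return category
--     return "spatial_relationships"
-- ===== Notes on version B (the rewrite author's own statement) =====
-- stated objective: simpler
-- what changed: Replaces A's collect-matching-flags/sort-by-priority/head/dict-lookup pipeline with one ordered scan of a fixed 6-row priority table, returning the mapped category of the first table key present in the flag set.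
import Mathlib
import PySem

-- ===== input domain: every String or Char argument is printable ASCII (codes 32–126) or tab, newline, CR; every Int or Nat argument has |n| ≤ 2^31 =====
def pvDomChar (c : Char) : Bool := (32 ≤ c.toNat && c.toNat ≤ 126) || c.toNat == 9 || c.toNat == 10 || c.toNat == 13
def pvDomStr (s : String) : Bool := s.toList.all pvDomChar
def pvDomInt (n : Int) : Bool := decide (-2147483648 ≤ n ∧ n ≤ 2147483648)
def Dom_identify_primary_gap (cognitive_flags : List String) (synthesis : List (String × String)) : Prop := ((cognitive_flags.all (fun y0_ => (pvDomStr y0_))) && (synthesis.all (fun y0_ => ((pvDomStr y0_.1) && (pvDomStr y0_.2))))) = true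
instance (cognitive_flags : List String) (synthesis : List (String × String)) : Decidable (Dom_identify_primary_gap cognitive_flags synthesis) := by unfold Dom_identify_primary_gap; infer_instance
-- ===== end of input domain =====

-- B replaces A's collect/sort/map pipeline by one ordered scan of the fixed priority table; objective: simpler.


-- ===== PORT A =====
-- gap_priority dict literal (distinct keys, insertion order)
def gapPriorityA : PySem.Dict String Int :=
  PySem.Dict.mk [("needs_brief_clarification", 1), ("needs_accessibility_guidance", 2),
                 ("needs_spatial_thinking_support", 3), ("low_confidence_analysis", 4),
                 ("complexity_mismatch_high", 5), ("complexity_mismatch_low", 6)]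

-- gap_mapping dict literal
def gapMappingA : PySem.Dict String String :=
  PySem.Dict.mk [("needs_accessibility_guidance", "accessibility_awareness"),
                 ("needs_spatial_thinking_support", "spatial_relationships"),
                 ("needs_brief_clarification", "brief_development"),
                 ("low_confidence_analysis", "brief_development"),
                 ("complexity_mismatch_high", "brief_development"),
                 ("complexity_mismatch_low", "systems_thinking")]

def identify_primary_gap (cognitive_flags : List String) (synthesis : List (String × String)) : String :=
  -- for flag in cognitive_flags: if flag in gap_priority: relevant_gaps.append((flag, gap_priority[flag]))
  let relevant_gaps : List (String × Int) :=
    cognitive_flags.foldl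
      (fun acc flag =>
        if gapPriorityA.contains flag then acc ++ [(flag, gapPriorityA.getD flag 0)] else acc) []
  -- Python: 'if relevant_gaps: relevant_gaps.sort(key=λx: x[1]); primary_gap = relevant_gaps[0][0] else default'.
  -- sorted xs = [] ↔ xs = [] (PySem.List.sorted_eq_nil_iff), so matching the sorted list is the same test.
  let primary_gap : String :=
    match PySem.List.sorted relevant_gaps (fun x => x.2) false with
    | p :: _ => p.1
    | [] => "spatial_relationships"
  gapMappingA.getD primary_gap "spatial_relationships"

-- ===== PORT B =====
-- the priority table of Source B, already in priority order, paired with each key's category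
def gapTableB : List (String × String) :=
  [("needs_brief_clarification", "brief_development"),
   ("needs_accessibility_guidance", "accessibility_awareness"),
   ("needs_spatial_thinking_support", "spatial_relationships"),
   ("low_confidence_analysis", "brief_development"),
   ("complexity_mismatch_high", "brief_development"),
   ("complexity_mismatch_low", "systems_thinking")]

-- 'for key, category in _GAP_TABLE: if key in flags: return category' / final 'return default'
def scanTableB (table : List (String × String)) (flags : PySem.Set String) : String :=
  match table with
  | [] => "spatial_relationships"
  | (key, category) :: rest =>
      if PySem.Set.contains flags key then category else scanTableB rest flags

def identify_primary_gap_alt (cognitive_flags : List String) (synthesis : List (String × String)) : String :=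
  scanTableB gapTableB (PySem.Set.ofList cognitive_flags)

-- ===== PRECONDITION & SPEC =====
def Spec_identify_primary_gap (cognitive_flags : List String) (synthesis : List (String × String)) (out : String) : Prop := out = identify_primary_gap_alt cognitive_flags synthesis
instance (cognitive_flags : List String) (synthesis : List (String × String)) (out : String) : Decidable (Spec_identify_primary_gap cognitive_flags synthesis out) := by unfold Spec_identify_primary_gap; infer_instance

-- ===== CLAIM (what is proved, stated in full; the proofs are below) =====
def Claim_equal_identify_primary_gap : Prop := ∀ (cognitive_flags : List String) (synthesis : List (String × String)), Dom_identify_primary_gap cognitive_flags synthesis → Spec_identify_primary_gap cognitive_flags synthesis (identify_primary_gap cognitive_flags synthesis)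

-- ===== LEMMAS AND PROOFS =====

-- A's loop is an append-if fold: it builds the filtered, priority-tagged flag list.
theorem relevant_eq (flags : List String) :
    flags.foldl
      (fun acc flag =>
        if gapPriorityA.contains flag then acc ++ [(flag, gapPriorityA.getD flag 0)] else acc) []
    = (flags.filter (fun f => gapPriorityA.contains f)).map (fun f => (f, gapPriorityA.getD f 0)) := by
  simpa using PySem.List.foldl_append_if (fun f => gapPriorityA.contains f)
    (fun f => (f, gapPriorityA.getD f 0)) (l := flags) (acc := [])

-- the only strings gap_priority contains are its six keys
theorem contains_cases (f : String) (h : gapPriorityA.contains f = true) :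
    f = "needs_brief_clarification" ∨ f = "needs_accessibility_guidance" ∨
    f = "needs_spatial_thinking_support" ∨ f = "low_confidence_analysis" ∨
    f = "complexity_mismatch_high" ∨ f = "complexity_mismatch_low" := by
  simp [gapPriorityA, PySem.Dict.contains] at h
  rcases h with h | h | h | h | h | h <;> simp [h]

-- the filtered, priority-tagged list A sorts (proof-side abbreviation)
def relevantR (flags : List String) : List (String × Int) :=
  (flags.filter (fun f => gapPriorityA.contains f)).map (fun f => (f, gapPriorityA.getD f 0))

-- head of A's sorted list: if k is a present key of minimal priority (and the unique key of that
-- priority), the sorted head's flag is k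
theorem A_primary (flags : List String) (k : String) (i : Int)
    (hc : gapPriorityA.contains k = true) (hg : gapPriorityA.getD k 0 = i) (hmem : k ∈ flags)
    (hmin : ∀ f ∈ flags, gapPriorityA.contains f = true → i ≤ gapPriorityA.getD f 0)
    (huniq : ∀ f, gapPriorityA.contains f = true → gapPriorityA.getD f 0 = i → f = k) :
    (match PySem.List.sorted (relevantR flags) (fun x => x.2) false with
     | p :: _ => p.1
     | [] => "spatial_relationships") = k := by
  have hkR : (k, i) ∈ relevantR flags := by
    simp only [relevantR, List.mem_map, List.mem_filter]
    exact ⟨k, ⟨hmem, hc⟩, by rw [hg]⟩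
  have hne : relevantR flags ≠ [] := by intro h; rw [h] at hkR; exact absurd hkR (by simp)
  cases hs : PySem.List.sorted (relevantR flags) (fun x => x.2) false with
  | nil => exact absurd ((PySem.List.sorted_eq_nil_iff _ _ _).mp hs) hne
  | cons m t =>
      have hmR : m ∈ relevantR flags := by
        have : m ∈ PySem.List.sorted (relevantR flags) (fun x => x.2) false := by
          rw [hs]; exact List.mem_cons_self
        exact (PySem.List.mem_sorted _ _ _ _).mp this
      obtain ⟨f, ⟨hfmem, hfc⟩, hfm⟩ := by
        simpa only [relevantR, List.mem_map, List.mem_filter] using hmR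
      have hle : m.2 ≤ i := PySem.List.key_head_sorted_le _ _ hs (k, i) hkR
      have hge : i ≤ gapPriorityA.getD f 0 := hmin f hfmem hfc
      have hm2 : m.2 = gapPriorityA.getD f 0 := by rw [← hfm]
      have : gapPriorityA.getD f 0 = i := le_antisymm (hm2 ▸ hle) hge
      have hfk : f = k := huniq f hfc this
      simp [← hfm, hfk]

theorem main_lemma (flags : List String) (synthesis : List (String × String)) :
    identify_primary_gap flags synthesis = identify_primary_gap_alt flags synthesis := by
  unfold identify_primary_gap identify_primary_gap_alt
  rw [relevant_eq]
  rw [show ((flags.filter (fun f => gapPriorityA.contains f)).map (fun f => (f, gapPriorityA.getD f 0)))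
      = relevantR flags from rfl]
  show gapMappingA.getD
      (match PySem.List.sorted (relevantR flags) (fun x => x.2) false with
       | p :: _ => p.1
       | [] => "spatial_relationships") "spatial_relationships"
    = scanTableB gapTableB (PySem.Set.ofList flags)
  by_cases h1 : "needs_brief_clarification" ∈ flags
  · rw [A_primary flags _ 1 (by decide) (by decide) h1
      (fun f hf hcf => by
        rcases contains_cases f hcf with h | h | h | h | h | h <;> subst h <;> decide)
      (fun f hcf he => by
        rcases contains_cases f hcf with h | h | h | h | h | h <;> subst h <;> first | rfl | (exfalso; revert he; decide))]
    simp [scanTableB, gapTableB, PySem.Set.mem_ofList, h1, gapMappingA, PySem.Dict.getD, PySem.Dict.get?]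
  by_cases h2 : "needs_accessibility_guidance" ∈ flags
  · rw [A_primary flags _ 2 (by decide) (by decide) h2
      (fun f hf hcf => by
        rcases contains_cases f hcf with h | h | h | h | h | h <;> subst h <;>
          first | (exact absurd hf h1) | decide)
      (fun f hcf he => by
        rcases contains_cases f hcf with h | h | h | h | h | h <;> subst h <;> first | rfl | (exfalso; revert he; decide))]
    simp [scanTableB, gapTableB, PySem.Set.mem_ofList, h1, h2, gapMappingA, PySem.Dict.getD, PySem.Dict.get?]
  by_cases h3 : "needs_spatial_thinking_support" ∈ flags
  · rw [A_primary flags _ 3 (by decide) (by decide) h3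
      (fun f hf hcf => by
        rcases contains_cases f hcf with h | h | h | h | h | h <;> subst h <;>
          first | (exact absurd hf h1) | (exact absurd hf h2) | decide)
      (fun f hcf he => by
        rcases contains_cases f hcf with h | h | h | h | h | h <;> subst h <;> first | rfl | (exfalso; revert he; decide))]
    simp [scanTableB, gapTableB, PySem.Set.mem_ofList, h1, h2, h3, gapMappingA, PySem.Dict.getD, PySem.Dict.get?]
  by_cases h4 : "low_confidence_analysis" ∈ flags
  · rw [A_primary flags _ 4 (by decide) (by decide) h4
      (fun f hf hcf => by
        rcases contains_cases f hcf with h | h | h | h | h | h <;> subst h <;>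
          first | (exact absurd hf h1) | (exact absurd hf h2) | (exact absurd hf h3) | decide)
      (fun f hcf he => by
        rcases contains_cases f hcf with h | h | h | h | h | h <;> subst h <;> first | rfl | (exfalso; revert he; decide))]
    simp [scanTableB, gapTableB, PySem.Set.mem_ofList, h1, h2, h3, h4, gapMappingA, PySem.Dict.getD, PySem.Dict.get?]
  by_cases h5 : "complexity_mismatch_high" ∈ flags
  · rw [A_primary flags _ 5 (by decide) (by decide) h5
      (fun f hf hcf => by
        rcases contains_cases f hcf with h | h | h | h | h | h <;> subst h <;>
          first | (exact absurd hf h1) | (exact absurd hf h2) | (exact absurd hf h3) | (exact absurd hf h4) | decide)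
      (fun f hcf he => by
        rcases contains_cases f hcf with h | h | h | h | h | h <;> subst h <;> first | rfl | (exfalso; revert he; decide))]
    simp [scanTableB, gapTableB, PySem.Set.mem_ofList, h1, h2, h3, h4, h5, gapMappingA, PySem.Dict.getD, PySem.Dict.get?]
  by_cases h6 : "complexity_mismatch_low" ∈ flags
  · rw [A_primary flags _ 6 (by decide) (by decide) h6
      (fun f hf hcf => by
        rcases contains_cases f hcf with h | h | h | h | h | h <;> subst h <;>
          first | (exact absurd hf h1) | (exact absurd hf h2) | (exact absurd hf h3) | (exact absurd hf h4) | (exact absurd hf h5) | decide)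
      (fun f hcf he => by
        rcases contains_cases f hcf with h | h | h | h | h | h <;> subst h <;> first | rfl | (exfalso; revert he; decide))]
    simp [scanTableB, gapTableB, PySem.Set.mem_ofList, h1, h2, h3, h4, h5, h6, gapMappingA, PySem.Dict.getD, PySem.Dict.get?]
  · -- no priority key occurs among the flags
    have hR : relevantR flags = [] := by
      simp only [relevantR, List.map_eq_nil_iff, List.filter_eq_nil_iff]
      intro f hf hcf
      rcases contains_cases f (by simpa using hcf) with h | h | h | h | h | h <;> subst h <;>
        first | (exact h1 hf) | (exact h2 hf) | (exact h3 hf) | (exact h4 hf) | (exact h5 hf) | (exact h6 hf)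
    rw [hR]
    simp [scanTableB, gapTableB, PySem.Set.mem_ofList, h1, h2, h3, h4, h5, h6,
      PySem.List.sorted, gapMappingA, PySem.Dict.getD, PySem.Dict.get?, gapMappingA, PySem.Dict.getD, PySem.Dict.get?]

-- ===== VERDICT (by name: the statement is the Claim_ definition above) =====
theorem identify_primary_gap_spec : Claim_equal_identify_primary_gap := by
  intro flags synthesis _
  exact main_lemma flags synthesis
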